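-- pv_equiv track=rewrite | github.com/nguyenmai333/Linear-Programming-FastApi | utils/validate_expression.py | preprocess_expression
-- ===== SOURCE A (Python) =====
-- def convert_to_subscript(expression):
--     new_expression = ''
--     i = 0
--     while i < len(expression):
--         new_expression += expression[i]
--         if i < len(expression) - 1:
--             if expression[i].isalpha() and expression[i+1].isdigit():
--                 new_expression += '_'
--         i += 1
--     return new_expression
--
-- def preprocess_expression(expr):
--     new_expr = ''
--     i = 0
--     while i < len(expr):
--         if expr[i].isdigit() and i < len(expr) - 1 and expr[i + 1].isalpha() and expr[i + 1].islower():
--             new_expr += expr[i] + '*'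
--         elif expr[i].isalpha() and expr[i].islower() and i < len(expr) - 1 and expr[i + 1].isalpha() and expr[i + 1].islower():
--             new_expr += expr[i] + '*'
--         else:
--             new_expr += expr[i]
--         i += 1
--     return convert_to_subscript(new_expr)
-- ===== SOURCE B (Python) =====
-- def preprocess_expression(expr):
--     # single fused pass: emit each char, then at most one marker ('*' or '_')
--     out = []
--     n = len(expr)
--     for i, ch in enumerate(expr):
--         out.append(ch)
--         if i + 1 < n:
--             nxt = expr[i + 1]
--             if (ch.isdigit() or (ch.isalpha() and ch.islower())) and nxt.isalpha() and nxt.islower():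
--                 out.append('*')
--             elif ch.isalpha() and nxt.isdigit():
--                 out.append('_')
--     return ''.join(out)
-- ===== Notes on version B (the rewrite author's own statement) =====
-- stated objective: faster
-- what changed: Replaced A's two string-building passes (insert '*', then rescan the new string to insert '_') by one fused pass over the original string that emits each char plus at most one marker, joined once at the end.
import Mathlib
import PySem

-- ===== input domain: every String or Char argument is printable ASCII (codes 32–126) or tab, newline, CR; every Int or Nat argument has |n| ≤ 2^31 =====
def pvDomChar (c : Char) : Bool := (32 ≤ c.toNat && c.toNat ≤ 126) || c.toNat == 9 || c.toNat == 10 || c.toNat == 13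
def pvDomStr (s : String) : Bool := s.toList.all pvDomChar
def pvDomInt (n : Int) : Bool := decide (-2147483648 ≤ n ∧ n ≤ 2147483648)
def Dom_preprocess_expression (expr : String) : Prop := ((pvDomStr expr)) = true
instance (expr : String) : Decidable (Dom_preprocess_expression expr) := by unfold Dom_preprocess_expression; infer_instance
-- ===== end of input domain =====

-- B fuses A's two insertion passes into one pass over the original string (objective: faster, O(n) vs A's repeated string concatenation).

-- ===== PORT A =====
-- A's first while loop: insert '*' after a digit or lowercase letter that precedes a lowercase letter
def pvA_main : List Char → List Char
  | [] => []
  | [c] => [c]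
  | c :: d :: rest =>
      (if PySem.Chars.isdigit c && (PySem.Chars.isalpha d && PySem.Chars.islower d) then [c, '*']
       else if (PySem.Chars.isalpha c && PySem.Chars.islower c) && (PySem.Chars.isalpha d && PySem.Chars.islower d) then [c, '*']
       else [c]) ++ pvA_main (d :: rest)

-- A's helper convert_to_subscript: insert '_' between a letter and a digit
def pvA_sub : List Char → List Char
  | [] => []
  | [c] => [c]
  | c :: d :: rest =>
      (if PySem.Chars.isalpha c && PySem.Chars.isdigit d then [c, '_'] else [c]) ++ pvA_sub (d :: rest)

def preprocess_expression (expr : String) : String :=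
  String.mk (pvA_sub (pvA_main expr.toList))

-- ===== PORT B =====
-- B's single fused loop: emit the char, then at most one marker decided from the next char
def pvB_loop : List Char → List Char
  | [] => []
  | [c] => [c]
  | c :: d :: rest =>
      c :: ((if (PySem.Chars.isdigit c || (PySem.Chars.isalpha c && PySem.Chars.islower c))
                && (PySem.Chars.isalpha d && PySem.Chars.islower d) then ['*']
             else if PySem.Chars.isalpha c && PySem.Chars.isdigit d then ['_']
             else []) ++ pvB_loop (d :: rest))

def preprocess_expression_alt (expr : String) : String :=
  String.mk (pvB_loop expr.toList)

-- ===== PRECONDITION & SPEC =====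
def Spec_preprocess_expression (expr : String) (out : String) : Prop := out = preprocess_expression_alt expr
instance (expr : String) (out : String) : Decidable (Spec_preprocess_expression expr out) := by unfold Spec_preprocess_expression; infer_instance

-- ===== CLAIM (what is proved, stated in full; the proofs are below) =====
def Claim_equal_preprocess_expression : Prop := ∀ (expr : String), Dom_preprocess_expression expr → Spec_preprocess_expression expr (preprocess_expression expr)

-- ===== LEMMAS AND PROOFS =====

-- A's first pass keeps the head character
theorem pvA_main_shape (d : Char) (rest : List Char) : ∃ t, pvA_main (d :: rest) = d :: t := by
  cases rest with
  | nil => exact ⟨[], rfl⟩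
  | cons e r => simp only [pvA_main]; split_ifs <;> exact ⟨_, rfl⟩

theorem pv_fuse (cs : List Char) : pvA_sub (pvA_main cs) = pvB_loop cs := by
  induction cs with
  | nil => rfl
  | cons c rest ih =>
    cases rest with
    | nil => rfl
    | cons d rest' =>
      obtain ⟨t, hM⟩ := pvA_main_shape d rest'
      rw [show pvA_sub (pvA_main (d :: rest')) = pvA_sub (d :: t) from by rw [hM]] at ih
      simp only [pvA_main, pvB_loop]
      by_cases hP : (PySem.Chars.isalpha d && PySem.Chars.islower d) = true <;>
      by_cases hQ : PySem.Chars.isdigit c = true <;>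
      by_cases hL : (PySem.Chars.isalpha c && PySem.Chars.islower c) = true <;>
      by_cases hR : (PySem.Chars.isalpha c && PySem.Chars.isdigit d) = true <;>
        simp [hM, pvA_sub, hP, hQ, hL, hR, ih,
          show PySem.Chars.isdigit '*' = false from rfl,
          show PySem.Chars.isalpha '*' = false from rfl]

-- ===== VERDICT (by name: the statement is the Claim_ definition above) =====
theorem preprocess_expression_spec : Claim_equal_preprocess_expression := by
  intro expr _
  unfold Spec_preprocess_expression preprocess_expression preprocess_expression_alt
  rw [pv_fuse]
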